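-- pv_equiv track=rewrite | github.com/Lightblues/Leetcode | contest/301-350/321.py | appendCharacters
-- ===== SOURCE A (Python) =====
-- def appendCharacters(s: str, t: str) -> int:
--     n,m = len(s),len(t)
--     # 从s中查找t的最长前缀子序列
--     i=j=0
--     while True:
--         if j==m or i==n: break
--         if s[i]==t[j]: j+=1; i+=1
--         else: i+=1
--     return m-j
-- ===== SOURCE B (Python) =====
-- def appendCharacters(s: str, t: str) -> int:
--     # Index map: each char of s -> ascending list of its positions (one pass over s).
--     positions = {}
--     for i, ch in enumerate(s):
--         positions.setdefault(ch, []).append(i)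
--     pos = -1
--     matched = 0
--     for ch in t:
--         lst = positions.get(ch, [])
--         # bisect_right(lst, pos) written out (A imports nothing, so no bisect import):
--         lo, hi = 0, len(lst)
--         while lo < hi:
--             mid = (lo + hi) // 2
--             if pos < lst[mid]:
--                 hi = mid
--             else:
--                 lo = mid + 1
--         if lo < len(lst):
--             pos = lst[lo]
--             matched += 1
--         else:
--             break
--     return len(t) - matched
-- ===== Notes on version B (the rewrite author's own statement) =====
-- stated objective: alternative
-- what changed: Replaces A's single two-pointer scan of s with a per-character position index built once over s, then advances a cursor through t by binary-searching each character's ascending occurrence list for the first position past the cursor.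
import Mathlib
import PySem

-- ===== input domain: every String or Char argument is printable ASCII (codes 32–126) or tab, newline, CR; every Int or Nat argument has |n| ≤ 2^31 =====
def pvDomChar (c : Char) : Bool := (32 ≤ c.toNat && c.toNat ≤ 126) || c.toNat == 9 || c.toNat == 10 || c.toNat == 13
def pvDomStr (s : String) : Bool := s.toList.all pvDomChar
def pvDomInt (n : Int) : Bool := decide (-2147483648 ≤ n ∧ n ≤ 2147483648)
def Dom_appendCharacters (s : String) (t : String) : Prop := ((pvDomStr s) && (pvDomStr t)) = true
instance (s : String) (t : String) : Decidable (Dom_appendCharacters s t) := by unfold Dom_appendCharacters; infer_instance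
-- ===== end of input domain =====

-- B replaces A's two-pointer scan by a per-character position index queried with binary search
-- (an alternative decomposition, not claimed faster; both programs are pure).

-- ===== PORT A =====
-- A's while-loop: i, j pointers; terminates when j == m or i == n.
-- (Python tests `i == n`; along the loop i never exceeds n, so the totalizing guard `n ≤ i` is the same test.)
def aLoop (sl tl : List Char) (i j : Nat) : Nat :=
  if j = tl.length ∨ sl.length ≤ i then j
  else if sl.getD i ' ' = tl.getD j ' ' then aLoop sl tl (i + 1) (j + 1)
  else aLoop sl tl (i + 1) j
termination_by sl.length - i
decreasing_by all_goals omega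

def appendCharacters (s : String) (t : String) : Int :=
  let sl := s.toList
  let tl := t.toList
  (tl.length : Int) - (aLoop sl tl 0 0 : Int)

-- ===== PORT B =====
-- positions: for i, ch in enumerate(s): positions.setdefault(ch, []).append(i)
def buildPos (sl : List Char) : PySem.Dict Char (List Int) :=
  (PySem.List.enumerate sl).foldl
    (fun d p => d.insert p.2 (d.getD p.2 [] ++ [p.1])) PySem.Dict.empty

-- for ch in t: lst = positions.get(ch, []); lo = bisect_right(lst, pos); advance or break
-- (Source B's hand-written lo/hi loop is exactly bisect_right; ported as PySem.List.bisectRight)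
def bLoop (pm : PySem.Dict Char (List Int)) : List Char → Int → Nat → Nat
  | [], _, matched => matched
  | c :: rest, pos, matched =>
    let lst := pm.getD c []
    let idx := PySem.List.bisectRight lst pos
    if idx < lst.length then bLoop pm rest (lst.getD idx 0) (matched + 1)
    else matched

def appendCharacters_alt (s : String) (t : String) : Int :=
  (t.toList.length : Int) - (bLoop (buildPos s.toList) t.toList (-1) 0 : Int)

-- ===== PRECONDITION & SPEC =====
def Spec_appendCharacters (s : String) (t : String) (out : Int) : Prop := out = appendCharacters_alt s t
instance (s : String) (t : String) (out : Int) : Decidable (Spec_appendCharacters s t out) := by unfold Spec_appendCharacters; infer_instance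

-- ===== CLAIM (what is proved, stated in full; the proofs are below) =====
def Claim_equal_appendCharacters : Prop := ∀ (s : String) (t : String), Dom_appendCharacters s t → Spec_appendCharacters s t (appendCharacters s t)

-- ===== LEMMAS AND PROOFS =====

-- number of characters of t matched greedily against s (the common mathematical core)
def greedy : List Char → List Char → Nat
  | _, [] => 0
  | [], _ :: _ => 0
  | a :: s', c :: t' => if a = c then greedy s' t' + 1 else greedy s' (c :: t')

-- ascending list of (k-offset) positions of c in a list
def occ (c : Char) : List Char → Int → List Int
  | [], _ => []
  | a :: l, k => if a = c then k :: occ c l (k + 1) else occ c l (k + 1)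

theorem occ_lb {c : Char} {x : Int} : ∀ {sl : List Char} {k : Int}, x ∈ occ c sl k → k ≤ x := by
  intro sl
  induction sl with
  | nil => intro k h; simp [occ] at h
  | cons a l ih =>
    intro k h
    simp only [occ] at h
    split at h
    · rcases List.mem_cons.mp h with h | h
      · omega
      · have := ih h; omega
    · have := ih h; omega

theorem occ_pairwise (c : Char) : ∀ (sl : List Char) (k : Int), (occ c sl k).Pairwise (· < ·) := by
  intro sl
  induction sl with
  | nil => intro k; simp [occ]
  | cons a l ih =>
    intro k
    simp only [occ]
    split
    · exact List.Pairwise.cons (fun x hx => by have := occ_lb hx; omega) (ih (k + 1))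
    · exact ih (k + 1)

theorem buildPos_aux (c : Char) : ∀ (sl : List Char) (k : Int) (d : PySem.Dict Char (List Int)),
    ((PySem.List.enumerate sl k).foldl
      (fun d p => d.insert p.2 (d.getD p.2 [] ++ [p.1])) d).getD c []
    = d.getD c [] ++ occ c sl k := by
  intro sl
  induction sl with
  | nil => intro k d; simp [PySem.List.enumerate_nil, occ]
  | cons a l ih =>
    intro k d
    rw [PySem.List.enumerate_cons]
    simp only [List.foldl_cons, occ]
    rw [ih (k + 1)]
    by_cases hac : c = a
    · subst hac
      rw [PySem.Dict.getD_insert]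
      simp
    · have hca : ¬a = c := fun h => hac h.symm
      rw [PySem.Dict.getD_insert]
      simp [hac, hca]

theorem buildPos_getD (sl : List Char) (c : Char) :
    (buildPos sl).getD c [] = occ c sl 0 := by
  unfold buildPos
  rw [buildPos_aux c sl 0 PySem.Dict.empty]
  simp

theorem occ_head (c : Char) : ∀ (u : List Char) (k : Int),
    (occ c u k).head? = (u.findIdx? (fun a => a = c)).map (fun i => k + (i : Int)) := by
  intro u
  induction u with
  | nil => intro k; simp [occ]
  | cons a l ih =>
    intro k
    simp only [occ, List.findIdx?_cons]
    by_cases h : a = c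
    · simp [h]
    · simp only [h, decide_false, Bool.false_eq_true, if_false]
      rw [ih (k + 1)]
      cases hf : l.findIdx? (fun a => decide (a = c)) with
      | none => simp
      | some i => simp; omega

theorem occ_filter (c : Char) : ∀ (p : Nat) (sl : List Char) (k : Int),
    (occ c sl k).filter (fun x => decide (k + (p : Int) - 1 < x)) = occ c (sl.drop p) (k + (p : Int)) := by
  intro p
  induction p with
  | zero =>
    intro sl k
    simp only [Nat.cast_zero, add_zero, List.drop_zero]
    apply List.filter_eq_self.mpr
    intro x hx
    have := occ_lb hx
    simp; omega
  | succ p ih =>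
    intro sl k
    cases sl with
    | nil => simp [occ]
    | cons a l =>
      simp only [occ, List.drop_succ_cons]
      have harith : k + ((p : Nat) + 1 : Int) - 1 = (k + 1) + (p : Int) - 1 := by ring
      split
      · rw [List.filter_cons]
        have : ¬ (k + ((p : Nat) + 1 : Nat) - 1 < k) := by push_cast; omega
        simp only [this, decide_false, if_neg, Bool.false_eq_true, not_false_iff]
        have := ih l (k + 1)
        push_cast at this ⊢
        rw [show k + ((p : Int) + 1) - 1 = (k + 1) + (p : Int) - 1 by ring]
        rw [this]
        ring_nf
      · have := ih l (k + 1)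
        push_cast at this ⊢
        rw [show k + ((p : Int) + 1) - 1 = (k + 1) + (p : Int) - 1 by ring]
        rw [this]
        ring_nf

theorem greedy_skip (c : Char) : ∀ (u : List Char) (t' : List Char),
    greedy u (c :: t') = (match u.findIdx? (fun a => a = c) with
      | none => 0
      | some i => greedy (u.drop (i + 1)) t' + 1) := by
  intro u
  induction u with
  | nil => intro t'; simp [greedy]
  | cons a l ih =>
    intro t'
    simp only [greedy, List.findIdx?_cons]
    by_cases h : a = c
    · simp [h]
    · simp only [h, decide_eq_true_eq]
      rw [ih t']
      cases hf : l.findIdx? (fun a => a = c) with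
      | none => simp
      | some i => simp

theorem filter_eq_drop_bisect (lst : List Int) (x : Int) (h : lst.Pairwise (· < ·)) :
    lst.filter (fun y => decide (x < y)) = lst.drop (PySem.List.bisectRight lst x) := by
  have hle : lst.Pairwise (· ≤ ·) := h.imp (fun h => le_of_lt h)
  obtain ⟨hlen, hbelow, habove⟩ := PySem.List.bisectRight_spec lst x hle
  set i := PySem.List.bisectRight lst x with hi
  conv_lhs => rw [← List.take_append_drop i lst]
  rw [List.filter_append]
  have h1 : (lst.take i).filter (fun y => decide (x < y)) = [] := by
    apply List.filter_eq_nil_iff.mpr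
    intro y hy
    obtain ⟨j, hj, hyj⟩ := List.mem_iff_getElem.mp hy
    have hj' : j < i := by have := lst.length_take_le i; simp at hj; omega
    have hjl : j < lst.length := by simp at hj; omega
    rw [List.getElem_take] at hyj
    have := hbelow j hjl hj'
    simp; omega
  have h2 : (lst.drop i).filter (fun y => decide (x < y)) = lst.drop i := by
    apply List.filter_eq_self.mpr
    intro y hy
    obtain ⟨j, hj, hyj⟩ := List.mem_iff_getElem.mp hy
    rw [List.getElem_drop] at hyj
    have hjl : i + j < lst.length := by simp at hj; omega
    have := habove (i + j) hjl (by omega)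
    simp; omega
  rw [h1, h2, List.nil_append]

theorem bLoop_eq (sl : List Char) (pm : PySem.Dict Char (List Int))
    (hpm : ∀ c, pm.getD c [] = occ c sl 0) :
    ∀ (tl : List Char) (p : Nat) (matched : Nat),
    bLoop pm tl ((p : Int) - 1) matched = matched + greedy (sl.drop p) tl := by
  intro tl
  induction tl with
  | nil => intro p matched; simp [bLoop, greedy]
  | cons c rest ih =>
    intro p matched
    simp only [bLoop, hpm c]
    set lst := occ c sl 0 with hlst
    set idx := PySem.List.bisectRight lst ((p : Int) - 1) with hidx
    have hfil : lst.filter (fun y => decide ((p : Int) - 1 < y)) = lst.drop idx :=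
      filter_eq_drop_bisect lst _ (occ_pairwise c sl 0)
    have hocc : lst.filter (fun y => decide ((p : Int) - 1 < y)) = occ c (sl.drop p) (p : Int) := by
      have := occ_filter c p sl 0
      simpa using this
    have hdrop : lst.drop idx = occ c (sl.drop p) (p : Int) := by rw [← hfil, hocc]
    rw [greedy_skip c]
    by_cases hlt : idx < lst.length
    · simp only [hlt, if_pos]
      have hne : lst.drop idx ≠ [] := by
        intro hnil
        have := List.drop_eq_nil_iff.mp hnil
        omega
      have hhead : (lst.drop idx).head? = some lst[idx] := by
        rw [List.drop_eq_getElem_cons hlt]; rfl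
      rw [hdrop] at hhead
      rw [occ_head] at hhead
      cases hf : (sl.drop p).findIdx? (fun a => a = c) with
      | none => rw [hf] at hhead; simp at hhead
      | some i =>
        rw [hf] at hhead
        simp at hhead
        have hval : lst.getD idx 0 = (p : Int) + (i : Int) := by
          rw [List.getD_eq_getElem lst 0 hlt]
          exact hhead.symm
        rw [hval]
        have : (p : Int) + (i : Int) = ((p + i + 1 : Nat) : Int) - 1 := by push_cast; ring
        rw [this, ih (p + i + 1) (matched + 1)]
        have hred : matched + 1 + greedy (List.drop (p + i + 1) sl) rest =
            matched + (greedy (List.drop (i + 1) (List.drop p sl)) rest + 1) := by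
          rw [List.drop_drop, show p + (i + 1) = p + i + 1 by omega]
          omega
        exact hred
    · simp only [hlt, if_neg, not_false_iff]
      have : lst.drop idx = [] := List.drop_eq_nil_iff.mpr (by omega)
      rw [this] at hdrop
      have hf : (sl.drop p).findIdx? (fun a => a = c) = none := by
        have := occ_head c (sl.drop p) (p : Int)
        rw [← hdrop] at this
        simp at this
        cases hx : (sl.drop p).findIdx? (fun a => a = c) with
        | none => rfl
        | some i => rw [hx] at this; simp at this
      rw [hf]
      simp

theorem aLoop_eq (sl tl : List Char) :
    ∀ (d i j : Nat), sl.length - i = d → i ≤ sl.length → j ≤ tl.length →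
    aLoop sl tl i j = j + greedy (sl.drop i) (tl.drop j) := by
  intro d
  induction d with
  | zero =>
    intro i j hd hi hj
    have hin : i = sl.length := by omega
    rw [aLoop, if_pos (Or.inr (by omega))]
    rw [show sl.drop i = [] from List.drop_eq_nil_iff.mpr (by omega)]
    cases tl.drop j <;> simp [greedy]
  | succ d ih =>
    intro i j hd hi hj
    have hilt : i < sl.length := by omega
    rw [aLoop]
    by_cases hjm : j = tl.length
    · rw [if_pos (Or.inl hjm)]
      rw [show tl.drop j = [] from List.drop_eq_nil_iff.mpr (by omega)]
      simp [greedy]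
    · have hjlt : j < tl.length := by omega
      rw [if_neg (by omega : ¬(j = tl.length ∨ sl.length ≤ i))]
      rw [List.drop_eq_getElem_cons hilt, List.drop_eq_getElem_cons hjlt]
      rw [List.getD_eq_getElem sl ' ' hilt, List.getD_eq_getElem tl ' ' hjlt]
      by_cases heq : sl[i] = tl[j]
      · simp only [heq, if_pos]
        rw [ih (i + 1) (j + 1) (by omega) (by omega) (by omega)]
        simp only [greedy, if_pos]
        omega
      · simp only [heq, if_neg, not_false_iff]
        rw [ih (i + 1) j (by omega) (by omega) (by omega)]
        simp only [greedy, heq, if_neg, not_false_iff]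
        rw [List.drop_eq_getElem_cons hjlt]

-- ===== VERDICT (by name: the statement is the Claim_ definition above) =====
theorem appendCharacters_spec : Claim_equal_appendCharacters := by
  intro s t _
  unfold Spec_appendCharacters appendCharacters appendCharacters_alt
  have hA := aLoop_eq s.toList t.toList (s.toList.length) 0 0 (by omega) (by omega) (by omega)
  have hB := bLoop_eq s.toList (buildPos s.toList) (fun c => buildPos_getD s.toList c) t.toList 0 0
  norm_num at hA hB
  show (t.toList.length : Int) - (aLoop s.toList t.toList 0 0 : Int)
      = (t.toList.length : Int) - (bLoop (buildPos s.toList) t.toList (-1) 0 : Int)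
  rw [hA, hB]
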